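-- pv_equiv track=rewrite | github.com/jjonhwa/agent_cc | src/rule_base/family.py | has_family_pattern_in_window
-- ===== SOURCE A (Python) =====
-- from typing import Dict, List
--
-- def has_family_pattern_in_window(events: List[Dict]) -> bool:
--     """
--     multi-criteria 기반 가족관계 영역 패턴 판정
--     각 event:
--     {
--         "signal": bool,
--         "class": List[str]
--     }
--     """
--     if not events:
--         return False
--
--     def count_class(target: str, window: list = None) -> int:
--         src = window if window is not None else events
--         return sum(1 for e in src if target in (e.get("class") or []))
--
--     recent3 = events[-3:]
--     last10 = events[-10:]
--
--     # -------------------------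
--     # 패턴 없음 조건 (early exit)
--     # -------------------------
--     # "가족의정서적실질적지지"가 최근 3회 내 등장 AND "관계 개선을 위한 행동"이 최근 3회 내 등장
--     if (
--         count_class("가족의정서적실질적지지", recent3) >= 1
--         and count_class("관계개선을위한행동", recent3) >= 1
--     ):
--         return False
--
--     # -------------------------
--     # 패턴 있음 조건
--     # -------------------------
--     # 1. "가족과의갈등이나연락단절"이 10회 중 3회 이상 등장 AND 그 중 1회 이상이 최근 3회 내에 등장
--     if (
--         count_class("가족과의갈등이나연락단절", last10) >= 3
--         and count_class("가족과의갈등이나연락단절", recent3) >= 1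
--     ):
--         return True
--
--     # 2. "가족과의갈등이나연락단절"이 3회 이상 등장
--     if count_class("가족과의갈등이나연락단절") >= 3:
--         return True
--
--     # 3. "상대방의거절의사"가 1회 이상 등장 AND "관계개선을위한행동"이 1회 이상 등장
--     if count_class("상대방의거절의사") >= 1 and count_class("관계개선을위한행동") >= 1:
--         return True
--
--     # 4. "가족과의갈등이나연락단절"이 1회 이상 등장 AND "이탈행동"이 10회 중 2회 이상 등장
--     if (
--         count_class("가족과의갈등이나연락단절") >= 1
--         and count_class("이탈행동", last10) >= 2
--     ):
--         return True
--
--     return False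
-- ===== SOURCE B (Python) =====
-- from typing import Dict, List
--
-- CONFLICT = "가족과의갈등이나연락단절"
-- SUPPORT = "가족의정서적실질적지지"
-- IMPROVE = "관계개선을위한행동"
-- REFUSE = "상대방의거절의사"
-- LEAVE = "이탈행동"
--
-- def has_family_pattern_in_window(events: List[Dict]) -> bool:
--     # Single reverse pass with a 1-based distance-from-the-end index: no slices,
--     # no repeated scans.  Window membership (recent 3 / last 10) is decided by
--     # the index i, and all eight relevant counters are accumulated in one loop;
--     # the original condition cascade is then evaluated once on the counters.
--     if not events:
--         return False
--     c3s = c3i = c3c = 0      # within the most recent 3 events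
--     c10c = c10l = 0          # within the last 10 events
--     cc = ci = cr = 0         # over all events
--     for i, e in enumerate(reversed(events), 1):
--         cls = e.get("class") or []
--         if SUPPORT in cls and i <= 3:
--             c3s += 1
--         if IMPROVE in cls:
--             ci += 1
--             if i <= 3:
--                 c3i += 1
--         if CONFLICT in cls:
--             cc += 1
--             if i <= 10:
--                 c10c += 1
--             if i <= 3:
--                 c3c += 1
--         if REFUSE in cls:
--             cr += 1
--         if LEAVE in cls and i <= 10:
--             c10l += 1
--     if c3s >= 1 and c3i >= 1:
--         return False
--     return (
--         (c10c >= 3 and c3c >= 1)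
--         or cc >= 3
--         or (cr >= 1 and ci >= 1)
--         or (cc >= 1 and c10l >= 2)
--     )
-- ===== Notes on version B (the rewrite author's own statement) =====
-- stated objective: alternative
-- what changed: Replaces A's eight separate count_class scans over the full list and two slices by a single reverse traversal with a distance-from-end index that decides recent3/last10 window membership per event and accumulates all eight counters in one loop; no slicing, then the cascade is evaluated once on the counters.
import Mathlib
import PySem

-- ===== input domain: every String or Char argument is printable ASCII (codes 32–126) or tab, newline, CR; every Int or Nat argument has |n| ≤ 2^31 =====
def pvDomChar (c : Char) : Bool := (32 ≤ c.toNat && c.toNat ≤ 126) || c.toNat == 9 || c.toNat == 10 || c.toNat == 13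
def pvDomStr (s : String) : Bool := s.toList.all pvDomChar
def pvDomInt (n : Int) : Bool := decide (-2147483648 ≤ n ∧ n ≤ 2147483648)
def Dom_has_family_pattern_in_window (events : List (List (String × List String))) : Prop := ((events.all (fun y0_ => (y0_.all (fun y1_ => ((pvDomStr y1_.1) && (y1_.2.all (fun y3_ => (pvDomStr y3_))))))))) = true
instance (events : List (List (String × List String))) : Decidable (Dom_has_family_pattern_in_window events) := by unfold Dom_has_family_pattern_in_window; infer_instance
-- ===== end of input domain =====

-- B replaces A's eight separate count_class scans (over the full list and two slices) by one
-- reverse traversal with a distance-from-end index deciding window membership per event,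
-- accumulating all eight counters in a single loop (objective: alternative).

-- ===== PORT A =====
-- e.get("class") or []  (None and missing both become [])
def pvClassOf (e : List (String × List String)) : List String :=
  (PySem.Dict.mk e).getD "class" []

-- count_class: sum(1 for e in src if target in (e.get("class") or []))
def pvCountClass (target : String) (src : List (List (String × List String))) : Int :=
  src.foldl (fun acc e => acc + (if target ∈ pvClassOf e then 1 else 0)) 0

def has_family_pattern_in_window (events : List (List (String × List String))) : Bool :=
  if events = [] then false
  else
    let recent3 := PySem.List.slice events (some (-3)) none
    let last10 := PySem.List.slice events (some (-10)) none
    if pvCountClass "가족의정서적실질적지지" recent3 ≥ 1 ∧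
       pvCountClass "관계개선을위한행동" recent3 ≥ 1 then false
    else if pvCountClass "가족과의갈등이나연락단절" last10 ≥ 3 ∧
            pvCountClass "가족과의갈등이나연락단절" recent3 ≥ 1 then true
    else if pvCountClass "가족과의갈등이나연락단절" events ≥ 3 then true
    else if pvCountClass "상대방의거절의사" events ≥ 1 ∧
            pvCountClass "관계개선을위한행동" events ≥ 1 then true
    else if pvCountClass "가족과의갈등이나연락단절" events ≥ 1 ∧
            pvCountClass "이탈행동" last10 ≥ 2 then true
    else false

-- ===== PORT B =====
-- loop state: (c3s, c3i, c3c, c10c, c10l, cc, ci, cr)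
abbrev pvSt := Int × Int × Int × Int × Int × Int × Int × Int

-- one iteration of Source B's loop body, on (i, e)
def pvStep (st : pvSt) (ie : Int × List (String × List String)) : pvSt :=
  let i := ie.1
  let cls := pvClassOf ie.2
  let (c3s, c3i, c3c, c10c, c10l, cc, ci, cr) := st
  let c3s := if "가족의정서적실질적지지" ∈ cls ∧ i ≤ 3 then c3s + 1 else c3s
  let ci := if "관계개선을위한행동" ∈ cls then ci + 1 else ci
  let c3i := if "관계개선을위한행동" ∈ cls ∧ i ≤ 3 then c3i + 1 else c3i
  let cc := if "가족과의갈등이나연락단절" ∈ cls then cc + 1 else cc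
  let c10c := if "가족과의갈등이나연락단절" ∈ cls ∧ i ≤ 10 then c10c + 1 else c10c
  let c3c := if "가족과의갈등이나연락단절" ∈ cls ∧ i ≤ 3 then c3c + 1 else c3c
  let cr := if "상대방의거절의사" ∈ cls then cr + 1 else cr
  let c10l := if "이탈행동" ∈ cls ∧ i ≤ 10 then c10l + 1 else c10l
  (c3s, c3i, c3c, c10c, c10l, cc, ci, cr)

def has_family_pattern_in_window_alt (events : List (List (String × List String))) : Bool :=
  if events = [] then false
  else
    let st := (PySem.List.enumerate events.reverse 1).foldl pvStep (0, 0, 0, 0, 0, 0, 0, 0)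
    let (c3s, c3i, c3c, c10c, c10l, cc, ci, cr) := st
    if c3s ≥ 1 ∧ c3i ≥ 1 then false
    else (c10c ≥ 3 ∧ c3c ≥ 1) ∨ cc ≥ 3 ∨ (cr ≥ 1 ∧ ci ≥ 1) ∨ (cc ≥ 1 ∧ c10l ≥ 2)

-- ===== PRECONDITION & SPEC =====
def Spec_has_family_pattern_in_window (events : List (List (String × List String))) (out : Bool) : Prop := out = has_family_pattern_in_window_alt events
instance (events : List (List (String × List String))) (out : Bool) : Decidable (Spec_has_family_pattern_in_window events out) := by unfold Spec_has_family_pattern_in_window; infer_instance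

-- ===== CLAIM (what is proved, stated in full; the proofs are below) =====
def Claim_equal_has_family_pattern_in_window : Prop := ∀ (events : List (List (String × List String))), Dom_has_family_pattern_in_window events → Spec_has_family_pattern_in_window events (has_family_pattern_in_window events)

-- ===== LEMMAS AND PROOFS =====

-- windowed count over an indexed list: events within the window i ≤ m containing t
def pvCntW (t : String) (m : Nat) (l : List (Int × List (String × List String))) : Int :=
  (l.map (fun ie => if t ∈ pvClassOf ie.2 ∧ ie.1 ≤ (m : Int) then (1:Int) else 0)).sum

-- unwindowed count over an indexed list
def pvCntA (t : String) (l : List (Int × List (String × List String))) : Int :=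
  (l.map (fun ie => if t ∈ pvClassOf ie.2 then (1:Int) else 0)).sum

-- A's count_class as a mapped sum
theorem pvCountClass_eq_sum (t : String) (src : List (List (String × List String))) :
    pvCountClass t src
      = (src.map (fun e => if t ∈ pvClassOf e then (1 : Int) else 0)).sum := by
  unfold pvCountClass
  rw [PySem.List.foldl_add src (fun e => if t ∈ pvClassOf e then (1 : Int) else 0) 0]
  simp

-- the loop computes exactly the eight counts, from any initial state
theorem pvLoop_spec (l : List (Int × List (String × List String))) :
    ∀ st : pvSt, l.foldl pvStep st =
      (st.1 + pvCntW "가족의정서적실질적지지" 3 l,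
       st.2.1 + pvCntW "관계개선을위한행동" 3 l,
       st.2.2.1 + pvCntW "가족과의갈등이나연락단절" 3 l,
       st.2.2.2.1 + pvCntW "가족과의갈등이나연락단절" 10 l,
       st.2.2.2.2.1 + pvCntW "이탈행동" 10 l,
       st.2.2.2.2.2.1 + pvCntA "가족과의갈등이나연락단절" l,
       st.2.2.2.2.2.2.1 + pvCntA "관계개선을위한행동" l,
       st.2.2.2.2.2.2.2 + pvCntA "상대방의거절의사" l) := by
  induction l with
  | nil => intro st; simp [pvCntW, pvCntA]
  | cons ie l ih =>
      intro st
      rw [List.foldl_cons, ih]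
      obtain ⟨c3s, c3i, c3c, c10c, c10l, cc, ci, cr⟩ := st
      simp only [pvStep, pvCntW, pvCntA, List.map_cons, List.sum_cons, Prod.mk.injEq, Nat.cast_ofNat]
      refine ⟨?_, ?_, ?_, ?_, ?_, ?_, ?_, ?_⟩ <;> split_ifs <;> ring

-- windowed count over enumerate from k: only the first (m + 1 - k) elements are in the window
theorem pvCntW_enumerate (t : String) (m : Nat) :
    ∀ (l : List (List (String × List String))) (k : Nat), 1 ≤ k →
      pvCntW t m (PySem.List.enumerate l (k : Int))
        = pvCountClass t (l.take (m + 1 - k)) := by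
  intro l
  induction l with
  | nil => intro k _; simp [pvCntW, pvCountClass]
  | cons e l ih =>
      intro k hk
      rw [PySem.List.enumerate_cons]
      have hcast : (k : Int) + 1 = ((k + 1 : Nat) : Int) := by push_cast; ring
      have ih' := ih (k + 1) (by omega)
      by_cases hkm : k ≤ m
      · have htake : (e :: l).take (m + 1 - k) = e :: l.take (m - k) := by
          have : m + 1 - k = (m - k) + 1 := by omega
          rw [this, List.take_succ_cons]
        have hmk : m + 1 - (k + 1) = m - k := by omega
        simp only [pvCntW, List.map_cons, List.sum_cons] at ih' ⊢
        rw [hcast, ih', hmk, htake, pvCountClass_eq_sum, pvCountClass_eq_sum,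
          List.map_cons, List.sum_cons]
        have hc : ((k : Int) ≤ (m : Int)) := by exact_mod_cast hkm
        by_cases hp : t ∈ pvClassOf e <;> simp [hp, hc]
      · have htake : (e :: l).take (m + 1 - k) = [] := by
          have : m + 1 - k = 0 := by omega
          simp [this]
        have hmk : m + 1 - (k + 1) = 0 := by omega
        simp only [pvCntW, List.map_cons, List.sum_cons] at ih' ⊢
        rw [hcast, ih', hmk, htake]
        have hc : ¬ ((k : Int) ≤ (m : Int)) := by
          simp only [Int.ofNat_le]; omega
        simp [hc, pvCountClass]

-- unwindowed count over enumerate is the plain count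
theorem pvCntA_enumerate (t : String) (l : List (List (String × List String))) (s : Int) :
    pvCntA t (PySem.List.enumerate l s) = pvCountClass t l := by
  unfold pvCntA
  rw [pvCountClass_eq_sum]
  have : (PySem.List.enumerate l s).map (fun ie => if t ∈ pvClassOf ie.2 then (1:Int) else 0)
      = ((PySem.List.enumerate l s).map (·.2)).map (fun e => if t ∈ pvClassOf e then (1:Int) else 0) := by
    rw [List.map_map]; rfl
  rw [this, PySem.List.map_snd_enumerate]

-- counts are invariant under reversal
theorem pvCountClass_reverse (t : String) (l : List (List (String × List String))) :
    pvCountClass t l.reverse = pvCountClass t l := by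
  rw [pvCountClass_eq_sum, pvCountClass_eq_sum, List.map_reverse, List.sum_reverse]

-- the first m of the reversal are the last m of the list
theorem pvCountClass_take_reverse (t : String) (l : List (List (String × List String))) (m : Nat) :
    pvCountClass t (l.reverse.take m) = pvCountClass t (l.drop (l.length - m)) := by
  rw [List.take_reverse, pvCountClass_reverse]

-- ===== VERDICT (by name: the statement is the Claim_ definition above) =====
theorem has_family_pattern_in_window_spec : Claim_equal_has_family_pattern_in_window := by
  intro events _
  unfold Spec_has_family_pattern_in_window has_family_pattern_in_window has_family_pattern_in_window_alt
  by_cases h : events = []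
  · simp [h]
  · simp only [h, if_false]
    rw [show (1 : Int) = ((1 : Nat) : Int) from rfl, pvLoop_spec]
    simp only [pvCntW_enumerate _ _ events.reverse 1 (le_refl 1),
      pvCntA_enumerate, pvCountClass_take_reverse, pvCountClass_reverse]
    rw [PySem.List.slice_from_neg_ofNat events 3 (by omega),
        PySem.List.slice_from_neg_ofNat events 10 (by omega)]
    norm_num
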